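-- pv_equiv track=rewrite | github.com/est-ai/MWPToolkit | mwptoolkit/data/dataset/korean_dataset.py | group_sub_tokens
-- ===== SOURCE A (Python) =====
-- def is_float_form(group, token):
--     return (len(group) > 0 and str.isdecimal(group[-1][1]) and token == '.') or \
--            (len(group) > 1 and str.isdecimal(group[-2][1]) and group[-1][1] == '.' and str.isdecimal(token))
--
-- def group_sub_tokens(tokens):
--     token_group = []
--     group = []
--     for i, token in enumerate(tokens):
--         if not token.startswith('##') and not is_float_form(group, token) and len(group) > 0:
--             token_group.append(tuple(group))
--             group = []
--         group.append((i, token))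
--     if len(group) > 0:
--         token_group.append(group)
--     return token_group
-- ===== SOURCE B (Python) =====
-- def _continues(tokens, start, j):
--     # token j continues the group that currently spans [start, j)
--     return tokens[j].startswith('##') or \
--         (tokens[j - 1].isdecimal() and tokens[j] == '.') or \
--         (j - start >= 2 and tokens[j - 2].isdecimal() and tokens[j - 1] == '.'
--          and tokens[j].isdecimal())
--
-- def group_sub_tokens(tokens):
--     n = len(tokens)
--     segs = []
--     i = 0
--     while i < n:
--         j = i + 1
--         while j < n and _continues(tokens, i, j):
--             j += 1
--         segs.append([(k, tokens[k]) for k in range(i, j)])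
--         i = j
--     return segs
-- ===== Notes on version B (the rewrite author's own statement) =====
-- stated objective: alternative
-- what changed: B replaces A's accumulator fold (group list carried in the loop state) by an index-based boundary scan: an inner while-loop advances j over the current group using a pure predicate on token indices, then each span [i,j) is emitted by slicing with enumerated indices; B returns every group as a plain list where A returns tuples for all groups but the last - under the type convention both are List (Int x String), so the ported values are equal.
import Mathlib
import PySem

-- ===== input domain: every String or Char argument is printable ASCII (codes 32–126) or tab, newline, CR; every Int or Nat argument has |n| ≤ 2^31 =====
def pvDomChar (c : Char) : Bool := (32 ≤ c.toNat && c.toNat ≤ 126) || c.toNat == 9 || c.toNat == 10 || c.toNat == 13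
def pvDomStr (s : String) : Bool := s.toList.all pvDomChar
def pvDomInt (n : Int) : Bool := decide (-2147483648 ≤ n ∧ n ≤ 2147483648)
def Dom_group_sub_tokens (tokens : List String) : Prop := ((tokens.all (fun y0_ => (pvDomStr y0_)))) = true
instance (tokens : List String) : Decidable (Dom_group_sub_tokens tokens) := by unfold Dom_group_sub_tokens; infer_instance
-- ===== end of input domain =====

-- B replaces A's accumulator fold (group list in the loop state) by an index-based boundary
-- scan with a pure predicate on token indices; same O(n) cost, different decomposition.
-- Python container note: A returns tuples for all groups but the last (a list), B returns
-- lists throughout; under the type convention both are List (Int × String), so the ported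
-- return values coincide and the equivalence below is about those values.

-- ===== PORT A =====
-- str.isdecimal is ported as PySem.Str.strIsdigit: exact on the printable-ASCII domain.
def is_float_form (group : List (Int × String)) (token : String) : Bool :=
  (decide (group.length > 0) &&
     PySem.Str.strIsdigit (PySem.List.pyGetD group (-1) (0, "")).2 &&
     decide (token = ".")) ||
  (decide (group.length > 1) &&
     PySem.Str.strIsdigit (PySem.List.pyGetD group (-2) (0, "")).2 &&
     decide ((PySem.List.pyGetD group (-1) (0, "")).2 = ".") &&
     PySem.Str.strIsdigit token)

-- the body of A's for-loop as a step function over the state (token_group, group)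
def AStep (st : List (List (Int × String)) × List (Int × String)) (it : Int × String) :
    List (List (Int × String)) × List (Int × String) :=
  let st' :=
    if (!PySem.Str.startswith it.2 "##" && !is_float_form st.2 it.2 &&
        decide (st.2.length > 0)) then
      (st.1 ++ [st.2], ([] : List (Int × String)))
    else st
  (st'.1, st'.2 ++ [it])

def group_sub_tokens (tokens : List String) : List (List (Int × String)) :=
  let st := (PySem.List.enumerate tokens 0).foldl AStep ([], [])
  if st.2.length > 0 then st.1 ++ [st.2] else st.1

-- ===== PORT B =====
-- _continues(tokens, start, j): pure predicate on indices
def altContinues (tokens : List String) (start j : Nat) : Bool :=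
  PySem.Str.startswith (PySem.List.pyGetD tokens (j : Int) "") "##" ||
  (PySem.Str.strIsdigit (PySem.List.pyGetD tokens ((j : Int) - 1) "") &&
     decide (PySem.List.pyGetD tokens (j : Int) "" = ".")) ||
  (decide (j - start ≥ 2) &&
     PySem.Str.strIsdigit (PySem.List.pyGetD tokens ((j : Int) - 2) "") &&
     decide (PySem.List.pyGetD tokens ((j : Int) - 1) "" = ".") &&
     PySem.Str.strIsdigit (PySem.List.pyGetD tokens (j : Int) ""))

-- inner while-loop:  while j < n and _continues(tokens, i, j): j += 1
-- (fuel-based structural recursion; fuel tokens.length - j is a totality guard only)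
def altAdvanceGo (tokens : List String) (start : Nat) : Nat → Nat → Nat
  | 0, j => j
  | fuel + 1, j =>
    if j < tokens.length ∧ altContinues tokens start j = true then
      altAdvanceGo tokens start fuel (j + 1)
    else j

def altAdvance (tokens : List String) (start j : Nat) : Nat :=
  altAdvanceGo tokens start (tokens.length - j) j

-- [(k, tokens[k]) for k in range(i, j)]
def altSeg (tokens : List String) (i j : Nat) : List (Int × String) :=
  (PySem.List.pyRange (i : Int) (j : Int) 1).map
    (fun k => (k, PySem.List.pyGetD tokens k ""))

-- outer while-loop collecting segs (fuel tokens.length - i is a totality guard only)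
def altScanGo (tokens : List String) : Nat → Nat → List (List (Int × String))
  | 0, _ => []
  | fuel + 1, i =>
    if i < tokens.length then
      altSeg tokens i (altAdvance tokens i (i + 1)) ::
        altScanGo tokens fuel (altAdvance tokens i (i + 1))
    else []

def altScan (tokens : List String) (i : Nat) : List (List (Int × String)) :=
  altScanGo tokens (tokens.length - i) i

def group_sub_tokens_alt (tokens : List String) : List (List (Int × String)) :=
  altScan tokens 0

-- ===== PRECONDITION & SPEC =====
def Spec_group_sub_tokens (tokens : List String) (out : List (List (Int × String))) : Prop := out = group_sub_tokens_alt tokens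
instance (tokens : List String) (out : List (List (Int × String))) : Decidable (Spec_group_sub_tokens tokens out) := by unfold Spec_group_sub_tokens; infer_instance

-- ===== CLAIM (what is proved, stated in full; the proofs are below) =====
def Claim_equal_group_sub_tokens : Prop := ∀ (tokens : List String), Dom_group_sub_tokens tokens → Spec_group_sub_tokens tokens (group_sub_tokens tokens)

-- ===== LEMMAS AND PROOFS =====

theorem le_altAdvanceGo (tokens : List String) (start : Nat) :
    ∀ fuel j, j ≤ altAdvanceGo tokens start fuel j := by
  intro fuel
  induction fuel with
  | zero => intro j; rfl
  | succ n ih =>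
    intro j
    rw [altAdvanceGo]
    split
    · exact Nat.le_trans (Nat.le_succ j) (ih (j + 1))
    · exact Nat.le_refl j

theorem altAdvanceGo_fuel (tokens : List String) (start : Nat) :
    ∀ fuel j, tokens.length - j ≤ fuel →
      altAdvanceGo tokens start fuel j = altAdvance tokens start j := by
  intro fuel
  induction fuel with
  | zero =>
    intro j h
    rw [altAdvance, Nat.eq_zero_of_le_zero h]
  | succ n ih =>
    intro j h
    rw [altAdvanceGo]
    split
    · next hg =>
      rw [ih (j + 1) (by omega)]
      conv_rhs => rw [altAdvance,
        show tokens.length - j = (tokens.length - (j + 1)) + 1 from by omega,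
        altAdvanceGo, if_pos hg]
      rfl
    · next hg =>
      conv_rhs => rw [altAdvance]
      rcases Nat.eq_zero_or_pos (tokens.length - j) with h0 | h0
      · rw [h0]; rfl
      · rw [show tokens.length - j = (tokens.length - j - 1) + 1 from by omega, altAdvanceGo,
          if_neg hg]

theorem altAdvance_eq (tokens : List String) (start j : Nat) :
    altAdvance tokens start j =
      if j < tokens.length ∧ altContinues tokens start j = true then
        altAdvance tokens start (j + 1)
      else j := by
  rw [altAdvance]
  rcases Nat.eq_zero_or_pos (tokens.length - j) with h0 | h0
  · rw [h0, altAdvanceGo, if_neg (by rintro ⟨h1, -⟩; omega)]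
  · rw [show tokens.length - j = (tokens.length - j - 1) + 1 from by omega, altAdvanceGo]
    split
    · exact altAdvanceGo_fuel tokens start _ (j + 1) (by omega)
    · rfl

theorem le_altAdvance (tokens : List String) (start j : Nat) :
    j ≤ altAdvance tokens start j :=
  le_altAdvanceGo tokens start _ j

theorem altScanGo_fuel (tokens : List String) :
    ∀ fuel i, tokens.length - i ≤ fuel →
      altScanGo tokens fuel i = altScan tokens i := by
  intro fuel
  induction fuel using Nat.strong_induction_on with
  | _ fuel ih =>
    intro i h
    cases fuel with
    | zero => rw [altScan, Nat.eq_zero_of_le_zero h]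
    | succ n =>
      rw [altScanGo]
      split
      · next hi =>
        have hadv : i + 1 ≤ altAdvance tokens i (i + 1) := le_altAdvance tokens i (i + 1)
        rw [ih n (by omega) (altAdvance tokens i (i + 1)) (by omega)]
        conv_rhs => rw [altScan,
          show tokens.length - i = (tokens.length - i - 1) + 1 from by omega,
          altScanGo, if_pos hi]
        rw [ih (tokens.length - i - 1) (by omega) (altAdvance tokens i (i + 1)) (by omega)]
      · next hi =>
        conv_rhs => rw [altScan]
        rcases Nat.eq_zero_or_pos (tokens.length - i) with h0 | h0
        · rw [h0]; rfl
        · rw [show tokens.length - i = (tokens.length - i - 1) + 1 from by omega, altScanGo,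
            if_neg hi]

theorem altScan_eq (tokens : List String) (i : Nat) :
    altScan tokens i =
      if i < tokens.length then
        altSeg tokens i (altAdvance tokens i (i + 1)) ::
          altScan tokens (altAdvance tokens i (i + 1))
      else [] := by
  rw [altScan]
  rcases Nat.eq_zero_or_pos (tokens.length - i) with h0 | h0
  · rw [h0, altScanGo, if_neg (by omega)]
  · rw [show tokens.length - i = (tokens.length - i - 1) + 1 from by omega, altScanGo]
    split
    · next hi =>
      have hadv : i + 1 ≤ altAdvance tokens i (i + 1) := le_altAdvance tokens i (i + 1)
      rw [altScanGo_fuel tokens _ (altAdvance tokens i (i + 1)) (by omega)]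
    · rfl

theorem length_altSeg (tokens : List String) (a j : Nat) :
    (altSeg tokens a j).length = j - a := by
  simp only [altSeg, List.length_map, PySem.List.length_pyRange_one]
  omega

theorem getElem_altSeg (tokens : List String) (a j m : Nat) (h : m < j - a) :
    (altSeg tokens a j)[m]'(by rw [length_altSeg]; exact h) =
      (((a + m : Nat) : Int), PySem.List.pyGetD tokens ((a + m : Nat) : Int) "") := by
  simp only [altSeg, List.getElem_map, PySem.List.getElem_pyRange_one]
  push_cast
  rfl

theorem altSeg_snoc (tokens : List String) (a i : Nat) (h : a ≤ i) :
    altSeg tokens a (i + 1) = altSeg tokens a i ++ [((i : Int), PySem.List.pyGetD tokens (i : Int) "")] := by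
  have : ((i + 1 : Nat) : Int) = (i : Int) + 1 := by push_cast; ring
  rw [altSeg, this, PySem.List.pyRange_one_succ_right (by exact_mod_cast h), List.map_append]
  rfl

theorem pyGetD_altSeg_neg (tokens : List String) (a i k : Nat) (hk : 0 < k) (hki : k ≤ i - a) (d : Int × String) :
    PySem.List.pyGetD (altSeg tokens a i) (-(k : Int)) d =
      (((i - k : Nat) : Int), PySem.List.pyGetD tokens ((i - k : Nat) : Int) "") := by
  rw [PySem.List.pyGetD_neg_natCast _ _ _ hk (by rw [length_altSeg]; exact hki)]
  have h2 : i - a - k < i - a := by omega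
  have key := getElem_altSeg tokens a i (i - a - k) h2
  have hidx : (altSeg tokens a i).length - k = i - a - k := by rw [length_altSeg]
  simp only [length_altSeg]
  rw [key]
  congr 2 <;> omega

-- A's break test on the group 'altSeg tokens a i' equals B's pure index predicate
theorem break_eq (tokens : List String) (a i : Nat) (ha : a < i) :
    (PySem.Str.startswith (PySem.List.pyGetD tokens (i : Int) "") "##" ||
      is_float_form (altSeg tokens a i) (PySem.List.pyGetD tokens (i : Int) "")) =
    altContinues tokens a i := by
  have hc1 : ((i - 1 : Nat) : Int) = (i : Int) - 1 := by omega
  have h1 : PySem.List.pyGetD (altSeg tokens a i) (-1) ((0 : Int), "") =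
      (((i - 1 : Nat) : Int), PySem.List.pyGetD tokens ((i : Int) - 1) "") := by
    rw [show (-1 : Int) = -((1 : Nat) : Int) from by norm_num,
        pyGetD_altSeg_neg tokens a i 1 (by omega) (by omega), hc1]
  by_cases h2a : 2 ≤ i - a
  · have hc2 : ((i - 2 : Nat) : Int) = (i : Int) - 2 := by omega
    have h2 : PySem.List.pyGetD (altSeg tokens a i) (-2) ((0 : Int), "") =
        (((i - 2 : Nat) : Int), PySem.List.pyGetD tokens ((i : Int) - 2) "") := by
      rw [show (-2 : Int) = -((2 : Nat) : Int) from by norm_num,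
          pyGetD_altSeg_neg tokens a i 2 (by omega) h2a, hc2]
    simp only [is_float_form, altContinues, h1, h2, length_altSeg, hc2,
      show (0 < i - a) = True from by simp; omega,
      show (1 < i - a) = True from by simp; omega,
      show (2 ≤ i - a) = True from by simp [h2a], decide_true, Bool.true_and]
    cases PySem.Str.startswith (PySem.List.pyGetD tokens (i : Int) "") "##" <;>
      cases PySem.Str.strIsdigit (PySem.List.pyGetD tokens ((i : Int) - 1) "") <;>
      cases decide (PySem.List.pyGetD tokens (i : Int) "" = ".") <;> simp
  · simp only [is_float_form, altContinues, h1, length_altSeg,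
      show (0 < i - a) = True from by simp; omega,
      show (1 < i - a) = False from by simp; omega,
      show (2 ≤ i - a) = False from by simp; omega,
      decide_true, decide_false, Bool.true_and, Bool.false_and, Bool.or_false]

def pvFinalize (st : List (List (Int × String)) × List (Int × String)) : List (List (Int × String)) :=
  if st.2.length > 0 then st.1 ++ [st.2] else st.1

-- loop invariant: A's fold, resumed mid-group, finishes as B's boundary scan from there
theorem main_invariant (tokens : List String) :
    ∀ fuel i a tg, tokens.length - i ≤ fuel → a < i → i ≤ tokens.length →
      pvFinalize ((PySem.List.enumerate (tokens.drop i) (i : Int)).foldl AStep (tg, altSeg tokens a i)) =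
      tg ++ (altSeg tokens a (altAdvance tokens a i) :: altScan tokens (altAdvance tokens a i)) := by
  intro fuel
  induction fuel with
  | zero =>
    intro i a tg hf ha hi
    have hin : i = tokens.length := by omega
    subst hin
    rw [List.drop_length, PySem.List.enumerate_nil, List.foldl_nil]
    rw [altAdvance_eq, if_neg (by rintro ⟨h1, -⟩; omega)]
    rw [altScan_eq, if_neg (by omega)]
    rw [pvFinalize]
    simp only [length_altSeg]
    rw [if_pos (by omega)]
  | succ n ih =>
    intro i a tg hf ha hile
    by_cases hi : i < tokens.length
    · -- step on token i
      have hget : PySem.List.pyGetD tokens (i : Int) "" = tokens[i] := by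
        rw [PySem.List.pyGetD_natCast, List.getD_eq_getElem tokens "" hi]
      have hdrop : tokens.drop i = tokens[i] :: tokens.drop (i + 1) :=
        List.drop_eq_getElem_cons hi
      have hcast : (i : Int) + 1 = ((i + 1 : Nat) : Int) := by push_cast; ring
      rw [hdrop, PySem.List.enumerate_cons, List.foldl_cons, hcast]
      have hcond : (!PySem.Str.startswith tokens[i] "##" &&
          !is_float_form (altSeg tokens a i) tokens[i] &&
          decide ((altSeg tokens a i).length > 0)) = !(altContinues tokens a i) := by
        rw [← break_eq tokens a i ha, ← hget]
        simp only [length_altSeg]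
        rw [decide_eq_true (by omega : 0 < i - a)]
        cases PySem.Str.startswith (PySem.List.pyGetD tokens (i : Int) "") "##" <;>
          cases is_float_form (altSeg tokens a i) (PySem.List.pyGetD tokens (i : Int) "") <;> rfl
      by_cases hcont : altContinues tokens a i = true
      · -- token i continues the group
        have : AStep (tg, altSeg tokens a i) ((i : Int), tokens[i]) = (tg, altSeg tokens a (i + 1)) := by
          rw [altSeg_snoc tokens a i (by omega), hget]
          simp only [AStep]
          rw [hcond, hcont]
          simp
        rw [this, ih (i + 1) a tg (by omega) (by omega) (by omega)]
        rw [show altAdvance tokens a i = altAdvance tokens a (i + 1) from by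
          rw [altAdvance_eq, if_pos ⟨hi, hcont⟩]]
      · -- token i starts a new group
        have hcf : altContinues tokens a i = false := by
          revert hcont; cases altContinues tokens a i <;> simp
        have : AStep (tg, altSeg tokens a i) ((i : Int), tokens[i]) =
            (tg ++ [altSeg tokens a i], altSeg tokens i (i + 1)) := by
          have hsing : PySem.List.pyRange ((i : Nat) : Int) (((i + 1 : Nat)) : Int) 1 = [((i : Nat) : Int)] := by
            rw [← hcast]; exact PySem.List.pyRange_one_singleton _
          rw [show altSeg tokens i (i + 1) = [((i : Int), tokens[i])] from by
            rw [altSeg, hsing, List.map_singleton, hget]]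
          simp only [AStep]
          rw [hcond, hcf]
          simp
        rw [this, ih (i + 1) i (tg ++ [altSeg tokens a i]) (by omega) (by omega) (by omega)]
        rw [show altAdvance tokens a i = i from by
          rw [altAdvance_eq, if_neg (by rintro ⟨-, hc⟩; exact hcont hc)]]
        conv_rhs => rw [altScan_eq]
        rw [if_pos hi]
        simp
    · have hin : i = tokens.length := by omega
      subst hin
      rw [List.drop_length, PySem.List.enumerate_nil, List.foldl_nil]
      rw [altAdvance_eq, if_neg (by rintro ⟨h1, -⟩; omega)]
      rw [altScan_eq, if_neg (by omega)]
      rw [pvFinalize]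
      simp only [length_altSeg]
      rw [if_pos (by omega)]

theorem a_eq_b (tokens : List String) : group_sub_tokens tokens = group_sub_tokens_alt tokens := by
  rw [show group_sub_tokens_alt tokens = altScan tokens 0 from rfl]
  cases tokens with
  | nil =>
    simp only [group_sub_tokens, PySem.List.enumerate_nil, List.foldl_nil]
    rw [altScan_eq, if_neg (by simp)]
    simp
  | cons t rest =>
    have hlen : 0 < (t :: rest).length := by simp
    have hstep : AStep ([], []) ((0 : Int), t) = ([], altSeg (t :: rest) 0 1) := by
      have : altSeg (t :: rest) 0 1 = [((0 : Int), t)] := by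
        simp only [altSeg, Nat.cast_zero, Nat.cast_one,
          show PySem.List.pyRange 0 1 1 = [(0 : Int)] from by decide,
          List.map_singleton, PySem.List.pyGetD_zero_cons]
      rw [this]
      simp [AStep]
    have MI := main_invariant (t :: rest) (t :: rest).length 1 0 [] (by omega) (by omega) (by simp)
    rw [show (t :: rest).drop 1 = rest from rfl, Nat.cast_one] at MI
    rw [show group_sub_tokens (t :: rest) =
        pvFinalize ((PySem.List.enumerate (t :: rest) 0).foldl AStep ([], [])) from rfl]
    rw [PySem.List.enumerate_cons, List.foldl_cons, hstep,
      show (0 : Int) + 1 = 1 from by norm_num, MI]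
    rw [show altScan (t :: rest) 0 = altSeg (t :: rest) 0 (altAdvance (t :: rest) 0 1) ::
        altScan (t :: rest) (altAdvance (t :: rest) 0 1) from by rw [altScan_eq, if_pos hlen]]
    simp

-- ===== VERDICT (by name: the statement is the Claim_ definition above) =====
theorem group_sub_tokens_spec : Claim_equal_group_sub_tokens := by
  intro tokens _
  unfold Spec_group_sub_tokens
  exact a_eq_b tokens
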